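-- pv_equiv track=rewrite | github.com/Seb-9/Proyecto1_IntroyTaller | General.py | aux_Binario
-- ===== SOURCE A (Python) =====
-- def aux_Binario(n,p,r):
--     if n<2:
--         return r+(n*(10**p))
--     else:
--         if n%2==0:
--             return aux_Binario(n//2,p+1,r+(0*(10**p)))
--         else:
--             return aux_Binario(n//2,p+1,r+(1*(10**p)))
-- ===== SOURCE B (Python) =====
-- def aux_Binario(n, p, r):
--     while n >= 2:
--         r += (n % 2) * (10 ** p)
--         n //= 2
--         p += 1
--     return r + n * (10 ** p)
-- ===== Notes on version B (the rewrite author's own statement) =====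
-- stated objective: idiomatic
-- what changed: Replaced the recursion that threads (n,p,r) through calls by an explicit iterative while-loop maintaining the accumulator r and position p directly, with one unified bit update instead of duplicated even/odd branches.
-- outside the precondition, e.g. on aux_Binario(5, -1, 0): A returns 10.1, B returns 10.1
import Mathlib
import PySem

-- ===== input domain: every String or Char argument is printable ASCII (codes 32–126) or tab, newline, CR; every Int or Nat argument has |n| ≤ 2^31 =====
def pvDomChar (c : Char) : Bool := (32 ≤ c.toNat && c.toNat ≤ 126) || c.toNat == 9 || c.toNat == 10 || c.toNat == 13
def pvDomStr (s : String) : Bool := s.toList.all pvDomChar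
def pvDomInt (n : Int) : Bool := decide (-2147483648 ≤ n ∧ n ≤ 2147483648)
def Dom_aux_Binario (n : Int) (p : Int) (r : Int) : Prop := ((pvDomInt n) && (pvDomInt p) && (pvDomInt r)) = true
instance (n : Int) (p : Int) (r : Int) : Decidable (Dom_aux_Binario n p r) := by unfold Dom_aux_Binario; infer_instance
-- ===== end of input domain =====

-- B replaces A's recursion by an explicit iterative accumulator loop (same cost); return-value equivalence on p ≥ 0.

-- termination helper for both recursions (cited by name in decreasing_by)
theorem pvHalf_lt (n : Int) (h : ¬ n < 2) : (PySem.Int.floordiv n 2).toNat < n.toNat := by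
  rw [PySem.Int.floordiv_eq_ediv_of_pos (by omega)]
  omega

-- ===== PORT A =====
-- literal port of A's recursion; 10**p ported as (10:Int)^p.toNat (exact for p ≥ 0, i.e. on Pre_)
def aux_Binario (n : Int) (p : Int) (r : Int) : Int :=
  if n < 2 then
    r + n * (10 : Int) ^ p.toNat
  else
    if PySem.Int.mod n 2 = 0 then
      aux_Binario (PySem.Int.floordiv n 2) (p + 1) (r + 0 * (10 : Int) ^ p.toNat)
    else
      aux_Binario (PySem.Int.floordiv n 2) (p + 1) (r + 1 * (10 : Int) ^ p.toNat)
  termination_by n.toNat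
  decreasing_by all_goals exact pvHalf_lt n (by assumption)

-- ===== PORT B =====
-- the while-loop of Source B: state (n, p, r), one step per iteration
def pvLoop_aux_Binario (n : Int) (p : Int) (r : Int) : Int × Int × Int :=
  if n < 2 then (n, p, r)
  else
    pvLoop_aux_Binario (PySem.Int.floordiv n 2) (p + 1)
      (r + PySem.Int.mod n 2 * (10 : Int) ^ p.toNat)
  termination_by n.toNat
  decreasing_by exact pvHalf_lt n (by assumption)

def aux_Binario_alt (n : Int) (p : Int) (r : Int) : Int :=
  let s := pvLoop_aux_Binario n p r
  s.2.2 + s.1 * (10 : Int) ^ s.2.1.toNat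

-- ===== PRECONDITION & SPEC =====
-- Pre_ excludes p < 0, where Python's 10**p is a float and A returns a float, not an int.
def Pre_aux_Binario (n : Int) (p : Int) (r : Int) : Prop := 0 ≤ p
instance (n : Int) (p : Int) (r : Int) : Decidable (Pre_aux_Binario n p r) := by unfold Pre_aux_Binario; infer_instance
def pvWitness_aux_Binario : Int × Int × Int := (13, 0, 0)

def Spec_aux_Binario (n : Int) (p : Int) (r : Int) (out : Int) : Prop := out = aux_Binario_alt n p r
instance (n : Int) (p : Int) (r : Int) (out : Int) : Decidable (Spec_aux_Binario n p r out) := by unfold Spec_aux_Binario; infer_instance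

-- ===== CLAIM (what is proved, stated in full; the proofs are below) =====
def Claim_equal_aux_Binario : Prop := ∀ (n : Int) (p : Int) (r : Int), Dom_aux_Binario n p r → Pre_aux_Binario n p r → Spec_aux_Binario n p r (aux_Binario n p r)

-- ===== LEMMAS AND PROOFS =====

theorem pvLoop_step (n p r : Int) (h : ¬ n < 2) :
    pvLoop_aux_Binario n p r =
      pvLoop_aux_Binario (PySem.Int.floordiv n 2) (p + 1)
        (r + PySem.Int.mod n 2 * (10 : Int) ^ p.toNat) := by
  conv_lhs => rw [pvLoop_aux_Binario]
  simp [h]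

theorem pvMod2 (n : Int) : PySem.Int.mod n 2 = 0 ∨ PySem.Int.mod n 2 = 1 := by
  rw [PySem.Int.mod_eq_emod_of_pos (by omega)]
  omega

theorem aux_Binario_eq_alt (n p r : Int) : aux_Binario n p r = aux_Binario_alt n p r := by
  induction n, p, r using aux_Binario.induct with
  | case1 n p r h =>
      rw [aux_Binario, if_pos h]
      simp only [aux_Binario_alt]
      rw [pvLoop_aux_Binario, if_pos h]
  | case2 n p r h he ih =>
      simp only [aux_Binario_alt] at ih ⊢
      rw [aux_Binario, if_neg h, if_pos he, ih, pvLoop_step n p r h, he]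
  | case3 n p r h he ih =>
      have h2 : PySem.Int.mod n 2 = 1 := (pvMod2 n).resolve_left he
      simp only [aux_Binario_alt] at ih ⊢
      rw [aux_Binario, if_neg h, if_neg he, ih, pvLoop_step n p r h, h2]

-- ===== VERDICT (by name: the statement is the Claim_ definition above) =====
theorem aux_Binario_spec : Claim_equal_aux_Binario := by
  intro n p r _ _
  unfold Spec_aux_Binario
  exact aux_Binario_eq_alt n p r
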